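-- pv_equiv track=rewrite | github.com/elmjag/pony | pony/i18n.py | read_phrases
-- ===== SOURCE A (Python) =====
-- from itertools import izip, count
--
-- class I18nParseError(Exception): pass
--
-- def read_phrases(lines):
--    kstr, lstr_list = None, []
--    for lineno, line in izip(count(1), lines):
--        if not line or line.isspace(): continue
--        elif line[0].isspace():
--            if kstr is None: raise I18nParseError(
--                "Translation string found but key string was expected in line %d" % lineno)
--            lstr_list.append((lineno, line))
--        elif kstr is None: kstr = lineno, line  # assert lineno == 1
--        else:
--            yield kstr, lstr_list
--            kstr, lstr_list = (lineno, line), []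
--    if kstr is not None:
--        yield kstr, lstr_list
-- ===== SOURCE B (Python) =====
-- from itertools import count, groupby
--
-- class I18nParseError(Exception): pass
--
-- def read_phrases(lines):
--     numbered = (p for p in zip(count(1), lines) if p[1] and not p[1].isspace())
--     state = [0]
--     def gid(p):
--         if not p[1][0].isspace():
--             state[0] += 1
--         return state[0]
--     for _, block in groupby(numbered, gid):
--         (lineno, line), *rest = block
--         if line[0].isspace():
--             raise I18nParseError(
--                 "Translation string found but key string was expected in line %d" % lineno)
--         yield (lineno, line), rest
-- ===== Notes on version B (the rewrite author's own statement) =====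
-- stated objective: idiomatic
-- what changed: A's hand-rolled accumulator state machine (pending key + growing translation list, flushed on the next key) is replaced by a filter-then-groupby pipeline: number lines, drop blanks, group by a counter bumped at each key line, and yield each group's head with its tail.
import Mathlib
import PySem

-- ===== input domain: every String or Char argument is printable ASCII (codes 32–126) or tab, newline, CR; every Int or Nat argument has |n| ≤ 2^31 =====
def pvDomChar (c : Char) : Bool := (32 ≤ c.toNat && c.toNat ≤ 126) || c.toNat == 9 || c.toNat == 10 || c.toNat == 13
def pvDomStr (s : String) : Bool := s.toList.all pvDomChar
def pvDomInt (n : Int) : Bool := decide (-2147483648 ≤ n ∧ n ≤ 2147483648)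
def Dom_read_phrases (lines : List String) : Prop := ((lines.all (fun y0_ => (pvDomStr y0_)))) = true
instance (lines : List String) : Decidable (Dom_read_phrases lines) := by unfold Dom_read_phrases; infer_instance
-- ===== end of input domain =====

-- B replaces A's hand-rolled accumulator state machine by filter + groupby (group id bumped at
-- each key line) and yields each block's head with its tail: same values, idiomatic decomposition.

-- shared transliterations of the Python tests `not line or line.isspace()` and `line[0].isspace()`
def pvBlank (line : String) : Bool := line.toList.isEmpty || PySem.Str.strIsspace line
def pvIndent (line : String) : Bool :=
  match line.toList with
  | [] => false
  | c :: _ => PySem.Chars.isspace c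

-- ===== PORT A =====
def readPhrasesGo (lineno : Int) (kstr : Option (Int × String)) (lstr : List (Int × String)) :
    List String → List ((Int × String) × (List (Int × String)))
  | [] =>
    match kstr with
    | none => []
    | some k => [(k, lstr)]
  | line :: rest =>
    if pvBlank line then readPhrasesGo (lineno + 1) kstr lstr rest
    else if pvIndent line then
      match kstr with
      | none => []  -- Python A raises I18nParseError here (excluded by Pre_); no yields so far
      | some _ => readPhrasesGo (lineno + 1) kstr (lstr ++ [(lineno, line)]) rest
    else
      match kstr with
      | none => readPhrasesGo (lineno + 1) (some (lineno, line)) lstr rest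
      | some k => (k, lstr) :: readPhrasesGo (lineno + 1) (some (lineno, line)) [] rest

def read_phrases (lines : List String) : List ((Int × String) × (List (Int × String))) :=
  readPhrasesGo 1 none [] lines

-- ===== PORT B =====
-- zip(count(1), lines) filtered of blank lines
def pvNumbered (lines : List String) : List (Int × String) :=
  (PySem.List.enumerate lines 1).filter (fun p => !pvBlank p.2)

-- groupby(numbered, gid): gid is bumped exactly at non-indented (key) lines, so a group is an
-- element together with the run of indented lines after it
def pvGroup : List (Int × String) → List (List (Int × String))
  | [] => []
  | x :: xs =>
    (x :: xs.takeWhile (fun y => pvIndent y.2)) ::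
      pvGroup (xs.dropWhile (fun y => pvIndent y.2))
termination_by l => l.length
decreasing_by simpa using Nat.lt_succ_of_le (List.length_dropWhile_le _ xs)

-- the for-loop over the groups: head is the key, tail the translations
def pvEmit : List (List (Int × String)) → List ((Int × String) × (List (Int × String)))
  | [] => []
  | [] :: more => pvEmit more  -- unreachable: groupby's groups are nonempty
  | (first :: rest) :: more =>
    if pvIndent first.2 then []  -- Python B raises I18nParseError here (excluded by Pre_)
    else (first, rest) :: pvEmit more

def read_phrases_alt (lines : List String) : List ((Int × String) × (List (Int × String))) :=
  pvEmit (pvGroup (pvNumbered lines))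

-- ===== PRECONDITION & SPEC =====
-- Pre_ excludes exactly the inputs on which Python A raises I18nParseError: those whose first
-- non-blank line starts with whitespace.
def Pre_read_phrases (lines : List String) : Prop :=
  ∀ l ∈ (lines.dropWhile pvBlank).head?, pvIndent l = false
instance (lines : List String) : Decidable (Pre_read_phrases lines) := by
  unfold Pre_read_phrases; infer_instance

def pvWitness_read_phrases : List String := ["hello", " hola", "", "bye", "\tadios"]

def Spec_read_phrases (lines : List String) (out : List ((Int × String) × (List (Int × String)))) : Prop := out = read_phrases_alt lines
instance (lines : List String) (out : List ((Int × String) × (List (Int × String)))) : Decidable (Spec_read_phrases lines out) := by unfold Spec_read_phrases; infer_instance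

-- ===== CLAIM (what is proved, stated in full; the proofs are below) =====
def Claim_equal_read_phrases : Prop := ∀ (lines : List String), Dom_read_phrases lines → Pre_read_phrases lines → Spec_read_phrases lines (read_phrases lines)

-- ===== LEMMAS AND PROOFS =====

-- with a key in hand, A's loop emits (key, pending ++ run of indented lines) and continues at the
-- first following key line — exactly B's current group
lemma go_some (lines : List String) (n : Int) (k : Int × String) (lstr : List (Int × String)) :
    readPhrasesGo n (some k) lstr lines =
      (k, lstr ++ ((PySem.List.enumerate lines n).filter (fun p => !pvBlank p.2)).takeWhile
            (fun y => pvIndent y.2)) ::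
        pvEmit (pvGroup (((PySem.List.enumerate lines n).filter (fun p => !pvBlank p.2)).dropWhile
            (fun y => pvIndent y.2))) := by
  induction lines generalizing n k lstr with
  | nil => simp [readPhrasesGo, PySem.List.enumerate_nil, pvGroup, pvEmit]
  | cons line rest ih =>
    rw [PySem.List.enumerate_cons]
    by_cases hb : pvBlank line
    · simp [readPhrasesGo, hb, ih]
    · by_cases hi : pvIndent line
      · simp [readPhrasesGo, hb, hi, ih]
      · simp [readPhrasesGo, hb, hi, ih, pvGroup, pvEmit]

-- before the first key line A's loop and B's pipeline agree (on a raise both produce [])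
lemma go_none (lines : List String) (n : Int) :
    readPhrasesGo n none [] lines =
      pvEmit (pvGroup ((PySem.List.enumerate lines n).filter (fun p => !pvBlank p.2))) := by
  induction lines generalizing n with
  | nil => simp [readPhrasesGo, PySem.List.enumerate_nil, pvGroup, pvEmit]
  | cons line rest ih =>
    rw [PySem.List.enumerate_cons]
    by_cases hb : pvBlank line
    · simp [readPhrasesGo, hb, ih]
    · by_cases hi : pvIndent line
      · simp [readPhrasesGo, hb, hi, pvGroup, pvEmit]
      · simp [readPhrasesGo, hb, hi, go_some, pvGroup, pvEmit]

-- ===== VERDICT (by name: the statement is the Claim_ definition above) =====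
theorem read_phrases_spec : Claim_equal_read_phrases := by
  intro lines _ _
  unfold Spec_read_phrases read_phrases read_phrases_alt pvNumbered
  exact go_none lines 1
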